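-- pv_equiv track=rewrite | github.com/DexTrail/CodinGame | CodinGame-002.py | general
-- ===== SOURCE A (Python) =====
-- def general(string: str) -> int:
--     """ General case (no patterns in the string) """
--     result = 0
--     length = len(string)
--     for i in range(length):
--         str1 = string[:i + 1]
--         if len(set(str1)) == 1 or str1 == str1[::-1]:
--             if i == length - 1:
--                 result += 3
--                 break
--
--             for j in range(i + 1, length):
--                 str2 = string[i + 1:j + 1]
--                 if len(set(str2)) == 1 or str2 == str2[::-1]:
--                     if j == length - 1:
--                         result += 3
--                         continue
--
--                     str3 = string[j + 1:]
--                     if len(set(str3)) == 1 or str3 == str3[::-1]: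
--                         result += 1
--     return result
-- ===== SOURCE B (Python) =====
-- def general(string: str) -> int:
--     n = len(string)
--     if n == 0:
--         return 0
--     # pal holds every (a, b) with string[a:b+1] a palindrome, built by interval DP
--     pal = set()
--     for a in range(n - 1, -1, -1):
--         for b in range(a, n):
--             if string[a] == string[b] and (b - a < 2 or (a + 1, b - 1) in pal):
--                 pal.add((a, b))
--     result = 3 if (0, n - 1) in pal else 0
--     for i in range(n - 1):
--         if (0, i) in pal:
--             if (i + 1, n - 1) in pal:
--                 result += 3
--             for j in range(i + 1, n - 1):
--                 if (i + 1, j) in pal and (j + 1, n - 1) in pal: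
--                     result += 1
--     return result
-- ===== Notes on version B (the rewrite author's own statement) =====
-- stated objective: faster
-- what changed: B precomputes the set of all palindromic intervals with a bottom-up interval DP (O(1) membership tests) and then counts the weighted 1/2/3-part splits with plain lookups, instead of A's re-slicing, set-building and reversing a substring at every probe.
import Mathlib
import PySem

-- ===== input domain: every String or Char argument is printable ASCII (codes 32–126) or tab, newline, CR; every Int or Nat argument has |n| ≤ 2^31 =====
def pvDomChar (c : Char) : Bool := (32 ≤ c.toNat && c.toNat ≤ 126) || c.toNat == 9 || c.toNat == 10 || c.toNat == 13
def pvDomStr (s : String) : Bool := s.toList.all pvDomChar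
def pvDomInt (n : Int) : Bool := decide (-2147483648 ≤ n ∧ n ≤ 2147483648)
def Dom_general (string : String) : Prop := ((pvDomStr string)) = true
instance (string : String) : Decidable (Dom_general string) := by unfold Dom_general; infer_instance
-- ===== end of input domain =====

-- Header: B replaces A's repeated slice/set-build/reverse palindrome tests by a precomputed interval-DP set of palindromic intervals queried during the counting loops (objective: faster; a timing run measured B faster on large inputs).


-- ===== PORT A =====
-- 'len(set(t)) == 1 or t == t[::-1]'
def pvCondA (t : List Char) : Bool :=
  (PySem.Set.len (PySem.Set.ofList t) == 1) || (PySem.List.slice? t none none (-1) == some t)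

-- inner 'for j in range(i+1, length)' loop of A
def pvLoopAInner (s : List Char) (len i : Int) : List Int → Int → Int
  | [], acc => acc
  | j :: rest, acc =>
    let str2 := PySem.List.slice s (some (i + 1)) (some (j + 1))
    if pvCondA str2 then
      if j == len - 1 then pvLoopAInner s len i rest (acc + 3)   -- continue
      else
        let str3 := PySem.List.slice s (some (j + 1)) none
        if pvCondA str3 then pvLoopAInner s len i rest (acc + 1)
        else pvLoopAInner s len i rest acc
    else pvLoopAInner s len i rest acc

-- outer 'for i in range(length)' loop of A (the break returns immediately)
def pvLoopAOuter (s : List Char) (len : Int) : List Int → Int → Int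
  | [], acc => acc
  | i :: rest, acc =>
    let str1 := PySem.List.slice s none (some (i + 1))
    if pvCondA str1 then
      if i == len - 1 then acc + 3   -- break
      else pvLoopAOuter s len rest (pvLoopAInner s len i (PySem.List.pyRange (i + 1) len 1) acc)
    else pvLoopAOuter s len rest acc

def general (string : String) : Int :=
  let s := string.toList
  let length : Int := PySem.Str.len string
  pvLoopAOuter s length (PySem.List.pyRange 0 length 1) 0

-- ===== PORT B =====
-- inner 'for b in range(a, n)' of the DP-table build
def pvBuildInner (s : List Char) (a : Int) : List Int → PySem.Set (Int × Int) → PySem.Set (Int × Int)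
  | [], pal => pal
  | b :: rest, pal =>
    if (PySem.List.pyGetD s a ' ' == PySem.List.pyGetD s b ' ') &&
       (decide (b - a < 2) || PySem.Set.contains pal (a + 1, b - 1)) then
      pvBuildInner s a rest (PySem.Set.add pal (a, b))
    else pvBuildInner s a rest pal

-- outer 'for a in range(n-1, -1, -1)' of the DP-table build
def pvBuildOuter (s : List Char) (n : Int) : List Int → PySem.Set (Int × Int) → PySem.Set (Int × Int)
  | [], pal => pal
  | a :: rest, pal => pvBuildOuter s n rest (pvBuildInner s a (PySem.List.pyRange a n 1) pal)

-- inner 'for j in range(i+1, n-1)' of B's counting loop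
def pvCountInner (pal : PySem.Set (Int × Int)) (n i : Int) : List Int → Int → Int
  | [], acc => acc
  | j :: rest, acc =>
    if PySem.Set.contains pal (i + 1, j) && PySem.Set.contains pal (j + 1, n - 1) then
      pvCountInner pal n i rest (acc + 1)
    else pvCountInner pal n i rest acc

-- outer 'for i in range(n-1)' of B's counting loop
def pvCountOuter (pal : PySem.Set (Int × Int)) (n : Int) : List Int → Int → Int
  | [], acc => acc
  | i :: rest, acc =>
    if PySem.Set.contains pal (0, i) then
      let acc1 := if PySem.Set.contains pal (i + 1, n - 1) then acc + 3 else acc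
      pvCountOuter pal n rest (pvCountInner pal n i (PySem.List.pyRange (i + 1) (n - 1) 1) acc1)
    else pvCountOuter pal n rest acc

def general_alt (string : String) : Int :=
  let s := string.toList
  let n : Int := PySem.Str.len string
  if n == 0 then 0
  else
    let pal := pvBuildOuter s n (PySem.List.pyRange (n - 1) (-1) (-1)) PySem.Set.empty
    let r0 : Int := if PySem.Set.contains pal (0, n - 1) then 3 else 0
    pvCountOuter pal n (PySem.List.pyRange 0 (n - 1) 1) r0

-- ===== PRECONDITION & SPEC =====
def Spec_general (string : String) (out : Int) : Prop := out = general_alt string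
instance (string : String) (out : Int) : Decidable (Spec_general string out) := by unfold Spec_general; infer_instance

-- ===== CLAIM (what is proved, stated in full; the proofs are below) =====
def Claim_equal_general : Prop := ∀ (string : String), Dom_general string → Spec_general string (general string)


-- ===== LEMMAS AND PROOFS =====

def pvSeg (s : List Char) (a b : Nat) : List Char := (s.drop a).take (b + 1 - a)
def pvPal (s : List Char) (a b : Nat) : Bool := (pvSeg s a b).reverse == pvSeg s a b

lemma pvCondA_eq (t : List Char) : pvCondA t = (t.reverse == t) := by
  unfold pvCondA
  rw [PySem.List.slice?_none_none_neg_one]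
  by_cases hp : t.reverse = t
  · simp [hp]
  · have h2 : (some t.reverse == some t) = false := by simp [hp]
    have h3 : (t.reverse == t) = false := by simp [hp]
    rw [h2, h3, Bool.or_false, Bool.eq_false_iff]
    intro hlen
    rw [beq_iff_eq] at hlen
    have h1 : (PySem.Set.ofList t).length = 1 := by
      have := hlen
      simp [PySem.Set.len] at this
      exact_mod_cast this
    obtain ⟨c, hc⟩ := List.length_eq_one_iff.mp h1
    have hall : ∀ x ∈ t, x = c := by
      intro x hx
      have : x ∈ PySem.Set.ofList t := (PySem.Set.mem_ofList t x).mpr hx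
      rw [hc] at this; simpa using this
    have hrep : t = List.replicate t.length c := List.eq_replicate_of_mem hall
    apply hp
    conv_lhs => rw [hrep]
    rw [List.reverse_replicate, ← hrep]

lemma pvSeg_decomp (s : List Char) (a b : Nat) (hab : a < b) (hb : b < s.length) :
    pvSeg s a b = s.getD a ' ' :: (pvSeg s (a+1) (b-1) ++ [s.getD b ' ']) := by
  have ha : a < s.length := lt_trans hab hb
  unfold pvSeg
  rw [List.drop_eq_getElem_cons ha]
  have h1 : b + 1 - a = (b - a - 1) + 2 := by omega
  rw [h1, List.take_succ_cons]
  congr 1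
  · exact (List.getD_eq_getElem s ' ' ha).symm
  · have h2 : b - a - 1 + 1 = (b - a - 1) + 1 := rfl
    rw [List.take_add_one]
    congr 1
    · congr 1; omega
    · have hlt : b - a - 1 < (s.drop (a+1)).length := by
        rw [List.length_drop]; omega
      rw [List.getElem?_drop]
      have : a + 1 + (b - a - 1) = b := by omega
      rw [this]
      simp [List.getElem?_eq_getElem hb]

lemma palin_cons_concat (c d : Char) (m : List Char) :
  ((c :: (m ++ [d])).reverse == (c :: (m ++ [d]))) = ((c == d) && (m.reverse == m)) := by
  simp only [List.reverse_cons, List.reverse_append, List.reverse_cons, List.reverse_nil,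
    List.nil_append, List.cons_append]
  rw [Bool.eq_iff_iff]
  simp only [beq_iff_eq, Bool.and_eq_true]
  constructor
  · intro h
    injection h with hx hy
    rw [hx] at hy
    exact ⟨hx.symm, (List.append_left_inj _).mp hy⟩
  · rintro ⟨h1, h2⟩
    subst h1
    rw [h2]

lemma pvPal_step (s : List Char) (a b : Nat) (hab : a ≤ b) (hb : b < s.length) :
    pvPal s a b = ((s.getD a ' ' == s.getD b ' ') && (decide (b < a + 2) || pvPal s (a+1) (b-1))) := by
  rcases Nat.eq_or_lt_of_le hab with heq | hlt
  · subst heq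
    have : pvSeg s a a = [s.getD a ' '] := by
      unfold pvSeg
      have ha : a < s.length := hb
      rw [List.drop_eq_getElem_cons ha]
      have : a + 1 - a = 1 := by omega
      rw [this, List.take_succ_cons, List.take_zero]
      rw [List.getD_eq_getElem s ' ' ha]
    unfold pvPal
    rw [this]
    simp
  · rw [pvPal, pvSeg_decomp s a b hlt hb, palin_cons_concat]
    congr 1
    by_cases h2 : b < a + 2
    · have hb1 : b = a + 1 := by omega
      subst hb1
      have : pvSeg s (a+1) a = [] := by
        unfold pvSeg
        have : a + 1 - (a + 1) = 0 := by omega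
        rw [this, List.take_zero]
      have hsub : a + 1 - 1 = a := by omega
      rw [pvPal, hsub, this]
      simp
    · simp [h2, pvPal]

lemma pvLoopAInner_add' (s : List Char) (len i : Int) (l : List Int) (acc : Int) :
    pvLoopAInner s len i l acc = acc + pvLoopAInner s len i l 0 := by
  induction l generalizing acc with
  | nil => simp [pvLoopAInner]
  | cons j rest ih =>
    simp only [pvLoopAInner]
    split_ifs
    · rw [ih (acc+3), ih (0+3)]; omega
    · rw [ih (acc+1), ih (0+1)]; omega
    · rw [ih acc]
    · rw [ih acc]

lemma pvCountInner_add' (pal : PySem.Set (Int × Int)) (n i : Int) (l : List Int) (acc : Int) :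
    pvCountInner pal n i l acc = acc + pvCountInner pal n i l 0 := by
  induction l generalizing acc with
  | nil => simp [pvCountInner]
  | cons j rest ih =>
    simp only [pvCountInner]
    split_ifs
    · rw [ih (acc+1), ih (0+1)]; omega
    · rw [ih acc]

lemma pvCountOuter_add' (pal : PySem.Set (Int × Int)) (n : Int) (l : List Int) (acc : Int) :
    pvCountOuter pal n l acc = acc + pvCountOuter pal n l 0 := by
  induction l generalizing acc with
  | nil => simp [pvCountOuter]
  | cons i rest ih =>
    simp only [pvCountOuter]
    split_ifs
    · rw [ih, @ih (pvCountInner pal n i (PySem.List.pyRange (i+1) (n-1) 1) (0+3))]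
      rw [pvCountInner_add', @pvCountInner_add' pal n i _ (0+3)]
      omega
    · rw [ih, @ih (pvCountInner pal n i (PySem.List.pyRange (i+1) (n-1) 1) 0)]
      rw [pvCountInner_add']
      omega
    · rw [ih acc]

def pvInv (s : List Char) (P : Nat → Nat → Prop) (pal : PySem.Set (Int × Int)) : Prop :=
  ∀ p : Int × Int, p ∈ pal ↔
    ∃ a b : Nat, p = ((a : Int), (b : Int)) ∧ a ≤ b ∧ b < s.length ∧ pvPal s a b = true ∧ P a b

lemma pv_contains_mem (pal : PySem.Set (Int × Int)) (p : Int × Int) :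
    PySem.Set.contains pal p = true ↔ p ∈ pal := by
  simp [PySem.Set.contains]

lemma pvBuildInner_inv (s : List Char) (a : Nat) (_ha : a < s.length) :
    ∀ (k : Nat) (bb : Nat), s.length = bb + k → a ≤ bb →
    ∀ pal, pvInv s (fun a' b' => a < a' ∨ (a' = a ∧ b' < bb)) pal →
    pvInv s (fun a' _ => a ≤ a')
      (pvBuildInner s (a : Int) (PySem.List.pyRange (bb : Int) (s.length : Int) 1) pal) := by
  intro k
  induction k with
  | zero =>
    intro bb hlen hab pal hInv
    have hbb : (bb : Int) = (s.length : Int) := by omega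
    rw [hbb, PySem.List.pyRange_one_eq_nil (le_refl _)]
    simp only [pvBuildInner]
    intro p
    rw [hInv p]
    constructor
    · rintro ⟨a', b', h1, h2, h3, h4, h5⟩
      exact ⟨a', b', h1, h2, h3, h4, by omega⟩
    · rintro ⟨a', b', h1, h2, h3, h4, h5⟩
      exact ⟨a', b', h1, h2, h3, h4, by omega⟩
  | succ k ihk =>
    intro bb hlen hab pal hInv
    have hbn : bb < s.length := by omega
    have hcons : PySem.List.pyRange (bb : Int) (s.length : Int) 1
        = (bb : Int) :: PySem.List.pyRange ((bb : Int) + 1) (s.length : Int) 1 :=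
      PySem.List.pyRange_one_cons (by exact_mod_cast hbn)
    rw [hcons]
    simp only [pvBuildInner]
    -- the DP condition equals pvPal s a bb
    have hcond : ((PySem.List.pyGetD s (a : Int) ' ' == PySem.List.pyGetD s (bb : Int) ' ') &&
        (decide ((bb : Int) - (a : Int) < 2) || PySem.Set.contains pal ((a : Int) + 1, (bb : Int) - 1)))
        = pvPal s a bb := by
      rw [PySem.List.pyGetD_natCast, PySem.List.pyGetD_natCast]
      by_cases h2 : bb < a + 2
      · have hd : decide ((bb : Int) - (a : Int) < 2) = true := by
          simp only [decide_eq_true_eq]; omega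
        rw [hd, Bool.true_or, Bool.and_true]
        rw [pvPal_step s a bb hab hbn]
        have : (decide (bb < a + 2) || pvPal s (a+1) (bb-1)) = true := by
          simp [h2]
        rw [this, Bool.and_true]
      · have hd : decide ((bb : Int) - (a : Int) < 2) = false := by
          simp only [decide_eq_false_iff_not]; omega
        rw [hd, Bool.false_or]
        have hcontains : PySem.Set.contains pal ((a : Int) + 1, (bb : Int) - 1)
            = pvPal s (a+1) (bb-1) := by
          by_cases hm : pvPal s (a+1) (bb-1) = true
          · rw [hm, pv_contains_mem, hInv]
            refine ⟨a+1, bb-1, ?_, by omega, by omega, hm, by omega⟩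
            simp only [Prod.mk.injEq]
            constructor <;> push_cast <;> omega
          · rw [Bool.eq_false_iff.mpr hm, Bool.eq_false_iff]
            intro hct
            rw [pv_contains_mem, hInv] at hct
            obtain ⟨a', b', h1, h2', h3, h4, h5⟩ := hct
            simp only [Prod.mk.injEq] at h1
            obtain ⟨hx, hy⟩ := h1
            have ha' : a' = a + 1 := by omega
            have hb' : b' = bb - 1 := by omega
            rw [ha', hb'] at h4
            exact hm h4
        rw [hcontains]
        rw [pvPal_step s a bb hab hbn]
        have : decide (bb < a + 2) = false := by simp [h2]
        rw [this, Bool.false_or]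
    rw [hcond]
    by_cases hc : pvPal s a bb = true
    · rw [if_pos hc]
      apply ihk (bb+1) (by omega) (by omega)
      · intro p
        rw [PySem.Set.mem_add, hInv]
        push_cast
        constructor
        · rintro (⟨a', b', h1, h2, h3, h4, h5⟩ | hp)
          · exact ⟨a', b', h1, h2, h3, h4, by omega⟩
          · exact ⟨a, bb, by rw [hp], hab, hbn, hc, by omega⟩
        · rintro ⟨a', b', h1, h2, h3, h4, h5⟩
          rcases h5 with h5 | ⟨h5a, h5b⟩
          · exact Or.inl ⟨a', b', h1, h2, h3, h4, Or.inl h5⟩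
          · by_cases hb' : b' = bb
            · rw [h5a, hb'] at h1; exact Or.inr h1
            · exact Or.inl ⟨a', b', h1, h2, h3, h4, Or.inr ⟨h5a, by omega⟩⟩
    · rw [if_neg hc]
      apply ihk (bb+1) (by omega) (by omega)
      intro p
      rw [hInv]
      constructor
      · rintro ⟨a', b', h1, h2, h3, h4, h5⟩
        exact ⟨a', b', h1, h2, h3, h4, by omega⟩
      · rintro ⟨a', b', h1, h2, h3, h4, h5⟩
        refine ⟨a', b', h1, h2, h3, h4, ?_⟩
        rcases h5 with h5 | ⟨h5a, h5b⟩
        · exact Or.inl h5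
        · have : b' ≠ bb := by
            intro hbb'
            rw [h5a, hbb'] at h4
            exact hc h4
          exact Or.inr ⟨h5a, by omega⟩

lemma pvBuildOuter_inv (s : List Char) :
    ∀ (aa : Nat), aa ≤ s.length →
    ∀ pal, pvInv s (fun a' _ => aa ≤ a') pal →
    pvInv s (fun _ _ => True)
      (pvBuildOuter s (s.length : Int) (PySem.List.pyRange ((aa : Int) - 1) (-1) (-1)) pal) := by
  intro aa
  induction aa with
  | zero =>
    intro _ pal hInv
    rw [PySem.List.pyRange_neg_one_eq_nil (by norm_num)]
    simp only [pvBuildOuter]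
    intro p
    rw [hInv p]
    constructor
    · rintro ⟨a', b', h1, h2, h3, h4, _⟩
      exact ⟨a', b', h1, h2, h3, h4, trivial⟩
    · rintro ⟨a', b', h1, h2, h3, h4, _⟩
      exact ⟨a', b', h1, h2, h3, h4, by omega⟩
  | succ aa ih =>
    intro haa pal hInv
    have hcons : PySem.List.pyRange ((aa : Int) + 1 - 1) (-1) (-1)
        = (aa : Int) :: PySem.List.pyRange ((aa : Int) - 1) (-1) (-1) := by
      have : ((aa : Int) + 1 - 1) = (aa : Int) := by ring
      rw [this]
      exact PySem.List.pyRange_neg_one_cons (by omega)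
    push_cast
    rw [hcons]
    simp only [pvBuildOuter]
    apply ih (by omega)
    have ha : aa < s.length := by omega
    apply pvBuildInner_inv s aa ha (s.length - aa) aa (by omega) (le_refl _)
    intro p
    rw [hInv p]
    constructor
    · rintro ⟨a', b', h1, h2, h3, h4, h5⟩
      exact ⟨a', b', h1, h2, h3, h4, by omega⟩
    · rintro ⟨a', b', h1, h2, h3, h4, h5⟩
      refine ⟨a', b', h1, h2, h3, h4, by omega⟩

lemma pvPalSet_contains (s : List Char) (x y : Nat)
    (pal : PySem.Set (Int × Int))
    (hpal : pal = pvBuildOuter s (s.length : Int) (PySem.List.pyRange ((s.length : Int) - 1) (-1) (-1)) PySem.Set.empty) :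
    PySem.Set.contains pal ((x : Int), (y : Int)) = (decide (x ≤ y) && decide (y < s.length) && pvPal s x y) := by
  have hEmpty : pvInv s (fun a' _ => s.length ≤ a') PySem.Set.empty := by
    intro p
    simp only [PySem.Set.empty]
    constructor
    · intro h; exact absurd h (List.not_mem_nil)
    · rintro ⟨a', b', h1, h2, h3, h4, h5⟩; omega
  have hInv := pvBuildOuter_inv s s.length (le_refl _) PySem.Set.empty hEmpty
  rw [← hpal] at hInv
  by_cases h : x ≤ y ∧ y < s.length ∧ pvPal s x y = true
  · obtain ⟨h1, h2, h3⟩ := h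
    have : PySem.Set.contains pal ((x : Int), (y : Int)) = true := by
      rw [pv_contains_mem, hInv]
      exact ⟨x, y, rfl, h1, h2, h3, trivial⟩
    rw [this]
    simp [h1, h2, h3]
  · have : PySem.Set.contains pal ((x : Int), (y : Int)) = false := by
      rw [Bool.eq_false_iff]
      intro hct
      rw [pv_contains_mem, hInv] at hct
      obtain ⟨a', b', hp1, hp2, hp3, hp4, _⟩ := hct
      simp only [Prod.mk.injEq] at hp1
      obtain ⟨hx, hy⟩ := hp1
      have hxx : a' = x := by omega
      have hyy : b' = y := by omega
      subst hxx
      subst hyy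
      exact h ⟨hp2, hp3, hp4⟩
    rw [this]
    rcases (Decidable.not_and_iff_or_not ..).mp h with h' | h'
    · simp [h']
    · rcases (Decidable.not_and_iff_or_not ..).mp h' with h'' | h''
      · simp [h'']
      · simp [h'']

lemma pvLoopAInner_append (s : List Char) (len i : Int) (l1 l2 : List Int) (acc : Int) :
    pvLoopAInner s len i (l1 ++ l2) acc = pvLoopAInner s len i l2 (pvLoopAInner s len i l1 acc) := by
  induction l1 generalizing acc with
  | nil => simp [pvLoopAInner]
  | cons j rest ih =>
    simp only [List.cons_append, pvLoopAInner]
    split_ifs <;> apply ih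

lemma pvLoopAOuter_append_nb (s : List Char) (len : Int) (l1 l2 : List Int) (acc : Int)
    (hnb : ∀ x ∈ l1, ¬(x = len - 1)) :
    pvLoopAOuter s len (l1 ++ l2) acc = pvLoopAOuter s len l2 (pvLoopAOuter s len l1 acc) := by
  induction l1 generalizing acc with
  | nil => simp [pvLoopAOuter]
  | cons i rest ih =>
    have hi : ¬(i = len - 1) := hnb i (by simp)
    have hrest : ∀ x ∈ rest, ¬(x = len - 1) := fun x hx => hnb x (by simp [hx])
    simp only [List.cons_append, pvLoopAOuter]
    have hbeq : (i == len - 1) = false := by simp [hi]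
    rw [hbeq]
    simp only [Bool.false_eq_true, if_false]
    split_ifs <;> exact ih _ hrest

lemma pv_slice_prefix (s : List Char) (k : Nat) :
    PySem.List.slice s none (some ((k : Int) + 1)) = pvSeg s 0 k := by
  have : ((k : Int) + 1) = ((k + 1 : Nat) : Int) := by push_cast; ring
  rw [this, PySem.List.slice_to_natCast]
  simp [pvSeg]

lemma pv_slice_mid (s : List Char) (k m : Nat) :
    PySem.List.slice s (some ((k : Int) + 1)) (some ((m : Int) + 1)) = pvSeg s (k + 1) m := by
  have h1 : ((k : Int) + 1) = ((k + 1 : Nat) : Int) := by push_cast; ring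
  have h2 : ((m : Int) + 1) = ((m + 1 : Nat) : Int) := by push_cast; ring
  rw [h1, h2, PySem.List.slice_natCast]
  rfl

lemma pv_slice_suffix (s : List Char) (m : Nat) (hN : 1 ≤ s.length) :
    PySem.List.slice s (some ((m : Int) + 1)) none = pvSeg s (m + 1) (s.length - 1) := by
  have h1 : ((m : Int) + 1) = ((m + 1 : Nat) : Int) := by push_cast; ring
  rw [h1, PySem.List.slice_from_natCast]
  unfold pvSeg
  rw [List.take_of_length_le]
  rw [List.length_drop]
  omega

lemma pvCondA_pal (s : List Char) (a b : Nat) : pvCondA (pvSeg s a b) = pvPal s a b := by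
  rw [pvCondA_eq, pvPal]

lemma pvInner_eq (s : List Char) (pal : PySem.Set (Int × Int))
    (hpal : pal = pvBuildOuter s (s.length : Int) (PySem.List.pyRange ((s.length : Int) - 1) (-1) (-1)) PySem.Set.empty)
    (hN : 1 ≤ s.length) (k : Nat) :
    ∀ l : List Int, (∀ j ∈ l, ∃ m : Nat, j = (m : Int) ∧ k < m ∧ m < s.length - 1) →
    ∀ acc, pvLoopAInner s (s.length : Int) (k : Int) l acc = pvCountInner pal (s.length : Int) (k : Int) l acc := by
  intro l
  induction l with
  | nil => intro _ acc; simp [pvLoopAInner, pvCountInner]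
  | cons j rest ih =>
    intro hmem acc
    obtain ⟨m, hj, hkm, hmN⟩ := hmem j (by simp)
    have hrest := fun x hx => hmem x (List.mem_cons_of_mem _ hx)
    subst hj
    simp only [pvLoopAInner, pvCountInner]
    rw [pv_slice_mid s k m, pvCondA_pal]
    have hc2 : PySem.Set.contains pal ((k : Int) + 1, (m : Int)) = pvPal s (k + 1) m := by
      have h1 : ((k : Int) + 1) = ((k + 1 : Nat) : Int) := by push_cast; ring
      rw [h1, pvPalSet_contains s (k+1) m pal hpal]
      have : (decide (k + 1 ≤ m)) = true := by simp; omega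
      rw [this]
      have : (decide (m < s.length)) = true := by simp; omega
      rw [this]
      simp
    have hc3 : PySem.Set.contains pal ((m : Int) + 1, (s.length : Int) - 1) = pvPal s (m + 1) (s.length - 1) := by
      have h1 : ((m : Int) + 1) = ((m + 1 : Nat) : Int) := by push_cast; ring
      have h2 : ((s.length : Int) - 1) = ((s.length - 1 : Nat) : Int) := by omega
      rw [h1, h2, pvPalSet_contains s (m+1) (s.length - 1) pal hpal]
      have : (decide (m + 1 ≤ s.length - 1)) = true := by simp; omega
      rw [this]
      have : (decide (s.length - 1 < s.length)) = true := by simp; omega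
      rw [this]
      simp
    rw [hc2, hc3]
    have hbeq : ((m : Int) == (s.length : Int) - 1) = false := by
      simp only [beq_eq_false_iff_ne, ne_eq]
      omega
    rw [hbeq]
    simp only [Bool.false_eq_true, if_false]
    rw [pv_slice_suffix s m hN, pvCondA_pal]
    by_cases hp2 : pvPal s (k+1) m = true
    · rw [hp2]
      by_cases hp3 : pvPal s (m+1) (s.length - 1) = true
      · rw [hp3]; simp only [Bool.and_self, if_pos]
        exact ih hrest (acc + 1)
      · rw [Bool.eq_false_iff.mpr hp3]
        simp only [Bool.and_false, Bool.false_eq_true, if_false]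
        split_ifs <;> exact ih hrest acc
    · rw [Bool.eq_false_iff.mpr hp2]
      simp only [Bool.false_and, Bool.false_eq_true, if_false]
      exact ih hrest acc

lemma pvInnerFull_eq (s : List Char) (pal : PySem.Set (Int × Int))
    (hpal : pal = pvBuildOuter s (s.length : Int) (PySem.List.pyRange ((s.length : Int) - 1) (-1) (-1)) PySem.Set.empty)
    (hN : 1 ≤ s.length) (k : Nat) (hk : k < s.length - 1) :
    pvLoopAInner s (s.length : Int) (k : Int) (PySem.List.pyRange ((k : Int) + 1) (s.length : Int) 1) 0
      = (if PySem.Set.contains pal ((k : Int) + 1, (s.length : Int) - 1) then 3 else 0)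
        + pvCountInner pal (s.length : Int) (k : Int) (PySem.List.pyRange ((k : Int) + 1) ((s.length : Int) - 1) 1) 0 := by
  have hsplit : PySem.List.pyRange ((k : Int) + 1) (s.length : Int) 1
      = PySem.List.pyRange ((k : Int) + 1) ((s.length : Int) - 1) 1 ++ [(s.length : Int) - 1] := by
    rw [PySem.List.pyRange_one_append ((k : Int) + 1) ((s.length : Int) - 1) (s.length : Int) (by omega) (by omega)]
    congr 1
    rw [PySem.List.pyRange_one_cons (by omega), PySem.List.pyRange_one_eq_nil (by omega)]
  rw [hsplit, pvLoopAInner_append]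
  -- last element
  have hlast : ∀ acc, pvLoopAInner s (s.length : Int) (k : Int) [(s.length : Int) - 1] acc
      = acc + (if PySem.Set.contains pal ((k : Int) + 1, (s.length : Int) - 1) then 3 else 0) := by
    intro acc
    simp only [pvLoopAInner]
    have h2 : ((s.length : Int) - 1) = ((s.length - 1 : Nat) : Int) := by omega
    rw [h2, pv_slice_mid s k (s.length - 1), pvCondA_pal]
    have hc : PySem.Set.contains pal ((k : Int) + 1, ((s.length - 1 : Nat) : Int)) = pvPal s (k + 1) (s.length - 1) := by
      have h1 : ((k : Int) + 1) = ((k + 1 : Nat) : Int) := by push_cast; ring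
      rw [h1, pvPalSet_contains s (k+1) (s.length - 1) pal hpal]
      have : (decide (k + 1 ≤ s.length - 1)) = true := by simp; omega
      rw [this]
      have : (decide (s.length - 1 < s.length)) = true := by simp; omega
      rw [this]
      simp
    rw [hc]
    by_cases hp : pvPal s (k+1) (s.length - 1) = true
    · rw [hp]; simp
    · rw [Bool.eq_false_iff.mpr hp]; simp
  rw [hlast]
  -- commute and convert the prefix part
  rw [pvInner_eq s pal hpal hN k _ ?hmem 0]
  · omega
  case hmem =>
    intro j hj
    rw [PySem.List.mem_pyRange_one] at hj
    refine ⟨j.toNat, by omega, by omega, by omega⟩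

lemma pvOuter_eq (s : List Char) (pal : PySem.Set (Int × Int))
    (hpal : pal = pvBuildOuter s (s.length : Int) (PySem.List.pyRange ((s.length : Int) - 1) (-1) (-1)) PySem.Set.empty)
    (hN : 1 ≤ s.length) :
    ∀ l : List Int, (∀ i ∈ l, ∃ kk : Nat, i = (kk : Int) ∧ kk < s.length - 1) →
    ∀ acc, pvLoopAOuter s (s.length : Int) l acc = pvCountOuter pal (s.length : Int) l acc := by
  intro l
  induction l with
  | nil => intro _ acc; simp [pvLoopAOuter, pvCountOuter]
  | cons i rest ih =>
    intro hmem acc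
    obtain ⟨k, hi, hkN⟩ := hmem i (by simp)
    have hrest := fun x hx => hmem x (List.mem_cons_of_mem _ hx)
    subst hi
    simp only [pvLoopAOuter, pvCountOuter]
    rw [pv_slice_prefix s k, pvCondA_pal]
    have hc1 : PySem.Set.contains pal ((0 : Int), (k : Int)) = pvPal s 0 k := by
      have h0 : (0 : Int) = ((0 : Nat) : Int) := by norm_num
      rw [h0, pvPalSet_contains s 0 k pal hpal]
      have : (decide (0 ≤ k)) = true := by simp
      rw [this]
      have : (decide (k < s.length)) = true := by simp; omega
      rw [this]
      simp
    rw [hc1]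
    by_cases hp : pvPal s 0 k = true
    · rw [hp]
      simp only [if_pos]
      have hbeq : ((k : Int) == (s.length : Int) - 1) = false := by
        simp only [beq_eq_false_iff_ne, ne_eq]; omega
      rw [hbeq]
      simp only [Bool.false_eq_true, if_false]
      rw [ih hrest]
      congr 1
      rw [pvLoopAInner_add', pvInnerFull_eq s pal hpal hN k hkN]
      by_cases hc3 : PySem.Set.contains pal ((k : Int) + 1, (s.length : Int) - 1) = true
      · rw [if_pos hc3, if_pos hc3, pvCountInner_add' pal _ _ _ (acc + 3)]
        omega
      · rw [if_neg hc3, if_neg hc3, pvCountInner_add' pal _ _ _ acc]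
        omega
    · rw [Bool.eq_false_iff.mpr hp]
      simp only [Bool.false_eq_true, if_false]
      exact ih hrest acc

lemma pv_main_list (s : List Char) (hN1 : 1 ≤ s.length) :
    pvLoopAOuter s (s.length : Int) (PySem.List.pyRange 0 (s.length : Int) 1) 0
      = pvCountOuter (pvBuildOuter s (s.length : Int) (PySem.List.pyRange ((s.length : Int) - 1) (-1) (-1)) PySem.Set.empty)
          (s.length : Int) (PySem.List.pyRange 0 ((s.length : Int) - 1) 1)
          (if PySem.Set.contains (pvBuildOuter s (s.length : Int) (PySem.List.pyRange ((s.length : Int) - 1) (-1) (-1)) PySem.Set.empty) ((0 : Int), (s.length : Int) - 1) = true then 3 else 0) := by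
  have h2 : ((s.length : Int) - 1) = ((s.length - 1 : Nat) : Int) := by omega
  have hcval : PySem.Set.contains
      (pvBuildOuter s (s.length : Int) (PySem.List.pyRange ((s.length : Int) - 1) (-1) (-1)) PySem.Set.empty)
      ((0 : Int), (s.length : Int) - 1) = pvPal s 0 (s.length - 1) := by
    rw [show (((0 : Int), (s.length : Int) - 1) : Int × Int)
          = ((((0 : Nat) : Int), ((s.length - 1 : Nat) : Int)) : Int × Int) from by
        rw [h2]; norm_num]
    rw [pvPalSet_contains s 0 (s.length - 1) _ rfl]
    have hd1 : (decide (0 ≤ s.length - 1)) = true := by simp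
    have hd2 : (decide (s.length - 1 < s.length)) = true := by simp; omega
    rw [hd1, hd2]
    simp
  have hsplit : PySem.List.pyRange 0 (s.length : Int) 1
      = PySem.List.pyRange 0 ((s.length : Int) - 1) 1 ++ [(s.length : Int) - 1] := by
    rw [PySem.List.pyRange_one_append 0 ((s.length : Int) - 1) (s.length : Int) (by omega) (by omega)]
    congr 1
    rw [PySem.List.pyRange_one_cons (by omega), PySem.List.pyRange_one_eq_nil (by omega)]
  rw [hsplit]
  rw [pvLoopAOuter_append_nb s (s.length : Int) _ _ 0 (by
    intro x hx
    rw [PySem.List.mem_pyRange_one] at hx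
    omega)]
  rw [pvOuter_eq s _ rfl hN1 _ (by
    intro i hi
    rw [PySem.List.mem_pyRange_one] at hi
    exact ⟨i.toNat, by omega, by omega⟩) 0]
  simp only [pvLoopAOuter]
  have hsl : PySem.List.slice s none (some ((s.length : Int) - 1 + 1)) = pvSeg s 0 (s.length - 1) := by
    rw [show ((s.length : Int) - 1 + 1) = ((s.length - 1 : Nat) : Int) + 1 from by omega]
    exact pv_slice_prefix s (s.length - 1)
  rw [hsl, pvCondA_pal]
  by_cases hp : pvPal s 0 (s.length - 1) = true
  · rw [if_pos hp, if_pos (hcval.trans hp)]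
    simp only [beq_self_eq_true, if_pos]
    rw [pvCountOuter_add' _ _ _ 3]
    omega
  · rw [if_neg hp, if_neg (fun hcc => hp (hcval.symm.trans hcc))]

theorem pv_main (string : String) : general string = general_alt string := by
  simp only [general, general_alt]
  by_cases h0 : string.toList.length = 0
  · have hlen0 : PySem.Str.len string = 0 := by rw [PySem.Str.len_eq, h0]; norm_num
    rw [hlen0]
    simp [pvLoopAOuter, PySem.List.pyRange_one_eq_nil]
  · rw [PySem.Str.len_eq]
    rw [if_neg (by simp only [beq_iff_eq]; intro hcon; exact h0 (by exact_mod_cast hcon))]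
    exact pv_main_list string.toList (by omega)

-- ===== VERDICT (by name: the statement is the Claim_ definition above) =====
theorem general_spec : Claim_equal_general := by
  intro string _
  exact pv_main string
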